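-- pv_equiv track=rewrite | github.com/airforcebrett/CSE1310-Intro-To-Programming | hw05/hw05_task01.py | smallest_all
-- ===== SOURCE A (Python) =====
-- def smallest_1(M,c_idx):
--     if M==[[]]:
--         temp_min=-1
--     else:
--         i=0
--         j=c_idx
--         min_list=[]
--         if c_idx%2!=0:
--             #do this for odd
--             while i<len(M):
--                 min_list.append(M[i][j])
--                 i=i+1
--             i=0
--             j=0
--             while i<=len(min_list):
--                 if i==len(min_list):
--                     break
--                 if min_list[i]%2!=0:
--                     i=i+1
--                     j=j+1
--                 else:
--                     min_list.pop(j)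
--
--
--
--         else:
--             if c_idx%2==0:
--
--             #do this for even"""
--                 while i<len(M):
--                     min_list.append(M[i][j])
--                     i=i+1
--                 i=0
--                 j=0
--                 while i<=len(min_list):
--                     if i==len(min_list):
--                         break
--                     if min_list[i]%2==0:
--                         i=i+1
--                         j=j+1
--                     else:
--                         min_list.pop(j)
--             else:
--                 error=-1
--                 return(error)
--         i=0
--         temp_min=0
--         if len(min_list)==0:
--             temp_min=-1
--         else:
--             temp_min=min_list[0]
--             while i<len(min_list):
--                 if min_list[i]<temp_min:
--                     temp_min=min_list[i]
--                     i=i+1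
--                 else:
--                     i=i+1
--
--     return(temp_min)
--
-- def smallest_all(M):
--     L_min=[]
--     i=0
--     #L=table_from_string(M)
--     j=len(M[0])
--     while i<j:
--         L_min.append(smallest_1(M,i))
--         i=i+1
--
--     return(L_min)
-- ===== SOURCE B (Python) =====
-- def _step(b, v, j):
--     return v if v % 2 == j % 2 and (b is None or v < b) else b
--
-- def smallest_all(M):
--     # Single row-major sweep with per-column running minima of parity-matching
--     # entries (None sentinel); None becomes -1 at the end.
--     cols = len(M[0])
--     best = [None] * cols
--     for row in M:
--         best = [_step(best[j], row[j], j) for j in range(cols)]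
--     return [-1 if b is None else b for b in best]
-- ===== Notes on version B (the rewrite author's own statement) =====
-- stated objective: faster
-- what changed: A computes each output column-major by materializing the whole column, destructively pop-filtering it for parity and then scanning for the minimum; B does one row-major sweep maintaining a per-column running minimum (None sentinel) and maps None to -1 at the end, avoiding the per-column list building and quadratic-ish pop compaction.
import Mathlib
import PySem

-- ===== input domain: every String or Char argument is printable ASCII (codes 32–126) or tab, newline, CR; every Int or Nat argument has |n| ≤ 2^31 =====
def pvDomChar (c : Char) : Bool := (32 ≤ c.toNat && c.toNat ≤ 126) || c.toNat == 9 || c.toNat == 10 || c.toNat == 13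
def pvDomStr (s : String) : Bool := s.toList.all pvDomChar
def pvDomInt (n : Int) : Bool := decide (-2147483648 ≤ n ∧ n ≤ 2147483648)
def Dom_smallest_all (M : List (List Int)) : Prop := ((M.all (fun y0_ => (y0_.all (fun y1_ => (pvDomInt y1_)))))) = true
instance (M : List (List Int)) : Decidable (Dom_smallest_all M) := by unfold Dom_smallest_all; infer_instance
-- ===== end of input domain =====

-- B replaces A's column-major gather/pop-filter/scan with one row-major sweep keeping
-- per-column running minima of parity-matching entries (measured faster by a constant factor).

-- ===== PORT A =====
-- while i<len(M): min_list.append(M[i][j])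
def pvGather (M : List (List Int)) (j : Int) : List Int :=
  (PySem.List.pyRange 0 M.length 1).foldl
    (fun acc i => acc ++ [PySem.List.pyGetD (PySem.List.pyGetD M i []) j 0]) []

-- the i/j pop-compaction loop of smallest_1; fuel = initial len(min_list) suffices,
-- since every iteration decreases len(min_list) - i (the default branches are unreachable)
def pvPopLoop (keep : Int → Bool) : Nat → List Int → Int → Int → List Int
  | 0, ml, _, _ => ml
  | fuel+1, ml, i, j =>
    if i < (ml.length : Int) then        -- `while i<=len: if i==len: break` ≡ `while i<len`
      if keep (PySem.List.pyGetD ml i 0) then pvPopLoop keep fuel ml (i+1) (j+1)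
      else pvPopLoop keep fuel (((PySem.List.pop? ml j).map Prod.snd).getD ml) i j
    else ml

-- temp_min = min_list[0]; while i<len: if min_list[i]<temp_min: temp_min=min_list[i]
def pvMinLoop (ml : List Int) : Int :=
  if ml.length == 0 then -1
  else
    (PySem.List.pyRange 0 ml.length 1).foldl
      (fun m i => if PySem.List.pyGetD ml i 0 < m then PySem.List.pyGetD ml i 0 else m)
      (PySem.List.pyGetD ml 0 0)

def smallest_1 (M : List (List Int)) (c_idx : Int) : Int :=
  if M == [[]] then -1
  else if PySem.Int.mod c_idx 2 != 0 then
    let ml := pvGather M c_idx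
    pvMinLoop (pvPopLoop (fun v => PySem.Int.mod v 2 != 0) ml.length ml 0 0)
  else if PySem.Int.mod c_idx 2 == 0 then
    let ml := pvGather M c_idx
    pvMinLoop (pvPopLoop (fun v => PySem.Int.mod v 2 == 0) ml.length ml 0 0)
  else -1          -- Python's dead `error=-1; return error` branch

def smallest_all (M : List (List Int)) : List Int :=
  (PySem.List.pyRange 0 ((PySem.List.pyGetD M 0 []).length) 1).foldl
    (fun acc i => acc ++ [smallest_1 M i]) []

-- ===== PORT B =====
def pvStep (b : Option Int) (v : Int) (j : Int) : Option Int :=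
  if (PySem.Int.mod v 2 == PySem.Int.mod j 2)
      && (match b with | none => true | some m => decide (v < m)) then some v else b

def smallest_all_alt (M : List (List Int)) : List Int :=
  let cols := (PySem.List.pyGetD M 0 []).length
  let best : List (Option Int) := List.replicate cols none
  let best := M.foldl (fun best row =>
      (PySem.List.pyRange 0 cols 1).map (fun j =>
        pvStep (PySem.List.pyGetD best j none) (PySem.List.pyGetD row j 0) j)) best
  best.map (fun b => match b with | none => -1 | some m => m)

-- ===== PRECONDITION & SPEC =====
-- Pre_ excludes exactly the inputs on which Python A raises IndexError:
-- the empty matrix (M[0] fails) and ragged inputs with a row shorter than the first row.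
def Pre_smallest_all (M : List (List Int)) : Prop :=
  M ≠ [] ∧ ∀ row ∈ M, (M.headD []).length ≤ row.length
instance (M : List (List Int)) : Decidable (Pre_smallest_all M) := by
  unfold Pre_smallest_all; infer_instance
def pvWitness_smallest_all : List (List Int) := [[2, 1], [4, 3]]

def Spec_smallest_all (M : List (List Int)) (out : List Int) : Prop := out = smallest_all_alt M
instance (M : List (List Int)) (out : List Int) : Decidable (Spec_smallest_all M out) := by
  unfold Spec_smallest_all; infer_instance

-- ===== CLAIM (what is proved, stated in full; the proofs are below) =====
def Claim_equal_smallest_all : Prop :=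
  ∀ (M : List (List Int)), Dom_smallest_all M → Pre_smallest_all M →
    Spec_smallest_all M (smallest_all M)

-- ===== LEMMAS AND PROOFS =====
def pvColVals (M : List (List Int)) (j : Int) : List Int :=
  M.map (fun row => PySem.List.pyGetD row j 0)

def pvKeep (j : Int) (v : Int) : Bool := PySem.Int.mod v 2 == PySem.Int.mod j 2

def pvMin2 (m v : Int) : Int := if v < m then v else m

lemma pvGather_eq (M : List (List Int)) (j : Int) : pvGather M j = pvColVals M j := by
  unfold pvGather pvColVals
  rw [PySem.List.foldl_append_singleton_eq_map, List.nil_append]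
  rw [show (fun i => PySem.List.pyGetD (PySem.List.pyGetD M i []) j 0)
      = (fun row => PySem.List.pyGetD row j 0) ∘ (fun i => PySem.List.pyGetD M i []) from rfl]
  rw [← List.map_map,
    show ((M.length : Int)) = PySem.List.len M from (PySem.List.len_eq M).symm,
    PySem.List.map_pyGetD_pyRange_zero]

lemma pvStep_skip (b : Option Int) (v : Int) (j : Int) (h : pvKeep j v = false) :
    pvStep b v j = b := by
  unfold pvKeep at h
  unfold pvStep
  rw [h]
  simp

lemma pvStep_keep (b : Option Int) (v : Int) (j : Int) (h : pvKeep j v = true) :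
    pvStep b v j = match b with
      | none => some v
      | some m => some (pvMin2 m v) := by
  unfold pvKeep at h
  unfold pvStep
  rw [h]
  cases b with
  | none => simp
  | some m =>
    by_cases hv : v < m <;> simp [hv, pvMin2]

lemma pvMinLoop_eq (ml : List Int) (h : ml ≠ []) :
    pvMinLoop ml = ml.foldl pvMin2 (ml.getD 0 0) := by
  unfold pvMinLoop
  rw [if_neg (by simpa using List.length_eq_zero_iff.not.mpr h)]
  rw [show (fun (m : Int) (i : Int) => if PySem.List.pyGetD ml i 0 < m then PySem.List.pyGetD ml i 0 else m)
      = (fun (m : Int) (i : Int) => pvMin2 m (PySem.List.pyGetD ml i 0)) from by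
        funext m i; simp [pvMin2]]
  rw [show ((ml.length : Int)) = PySem.List.len ml from (PySem.List.len_eq ml).symm,
    PySem.List.foldl_pyRange_zero_pyGetD, PySem.List.pyGetD_zero]

lemma pvPopLoop_eq (keep : Int → Bool) :
    ∀ (fuel : Nat) (ml : List Int) (i : Nat), ml.length ≤ i + fuel →
      pvPopLoop keep fuel ml (i : Int) (i : Int) =
        ml.take i ++ (ml.drop i).filter keep := by
  intro fuel
  induction fuel with
  | zero =>
    intro ml i hle
    simp only [Nat.add_zero] at hle
    unfold pvPopLoop
    rw [List.take_of_length_le hle, List.drop_of_length_le hle]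
    simp
  | succ fuel ih =>
    intro ml i hle
    unfold pvPopLoop
    by_cases hi : i < ml.length
    · rw [if_pos (by exact_mod_cast hi)]
      have hget : PySem.List.pyGetD ml (i : Int) 0 = ml[i] := by
        rw [PySem.List.pyGetD_natCast, List.getD_eq_getElem ml 0 hi]
      rw [hget]
      have hdrop : ml.drop i = ml[i] :: ml.drop (i + 1) := List.drop_eq_getElem_cons hi
      by_cases hk : keep ml[i]
      · rw [if_pos hk]
        have : ((i : Int) + 1) = ((i + 1 : Nat) : Int) := by push_cast; ring
        rw [this, ih ml (i + 1) (by omega)]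
        rw [hdrop, List.filter_cons, if_pos hk]
        have htake1 : ml.take (i + 1) = ml.take i ++ [ml[i]] := by
          rw [List.take_add_one, List.getElem?_eq_getElem hi]; rfl
        rw [htake1, List.append_assoc]
        rfl
      · rw [if_neg hk]
        have hpop : PySem.List.pop? ml (i : Int) = some (ml[i], ml.eraseIdx i) :=
          PySem.List.pop?_natCast ml i hi
        rw [hpop]
        simp only [Option.map_some, Option.getD_some]
        have hlen' : (ml.eraseIdx i).length ≤ i + fuel := by
          rw [List.length_eraseIdx_of_lt hi]; omega
        rw [ih (ml.eraseIdx i) i hlen']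
        have herase : ml.eraseIdx i = ml.take i ++ ml.drop (i + 1) :=
          List.eraseIdx_eq_take_drop_succ ml i
        have hlt : i ≤ ml.length := le_of_lt hi
        have hlen_take : (ml.take i).length = i := by
          rw [List.length_take, min_eq_left hlt]
        have htake : (ml.eraseIdx i).take i = ml.take i := by
          rw [herase, List.take_left' hlen_take]
        have hdrop' : (ml.eraseIdx i).drop i = ml.drop (i + 1) := by
          rw [herase, List.drop_left' hlen_take]
        rw [htake, hdrop', hdrop, List.filter_cons, if_neg (by simp [hk])]
    · rw [if_neg (by exact_mod_cast hi)]
      have hle' : ml.length ≤ i := by omega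
      rw [List.take_of_length_le hle', List.drop_of_length_le hle']
      simp

lemma pvFold_filter (j : Int) (col : List Int) (b : Option Int) :
    col.foldl (fun b v => pvStep b v j) b =
      (col.filter (pvKeep j)).foldl (fun b v => pvStep b v j) b := by
  induction col generalizing b with
  | nil => rfl
  | cons v t ih =>
    by_cases hk : pvKeep j v
    · simp only [List.foldl_cons, List.filter_cons, if_pos hk]
      exact ih _
    · have hkf : pvKeep j v = false := by simpa using hk
      rw [List.foldl_cons, pvStep_skip _ _ _ hkf, List.filter_cons,
        if_neg (by simp [hkf])]
      exact ih b

lemma pvFold_some (j : Int) (t : List Int) (m : Int)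
    (h : ∀ v ∈ t, pvKeep j v = true) :
    t.foldl (fun b v => pvStep b v j) (some m) = some (t.foldl pvMin2 m) := by
  induction t generalizing m with
  | nil => rfl
  | cons v t ih =>
    simp only [List.foldl_cons]
    rw [pvStep_keep _ _ _ (h v (by simp))]
    exact ih (pvMin2 m v) (fun w hw => h w (by simp [hw]))

lemma pvOmin_eq (j : Int) (col : List Int) :
    (col.foldl (fun b v => pvStep b v j) none).elim (-1 : Int) id =
      (match col.filter (pvKeep j) with
       | [] => (-1 : Int)
       | h :: t => (h :: t).foldl pvMin2 h) := by
  rw [pvFold_filter]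
  cases hf : col.filter (pvKeep j) with
  | nil => simp
  | cons h t =>
    have hmem : ∀ v ∈ h :: t, pvKeep j v = true := by
      intro v hv
      exact List.of_mem_filter (p := pvKeep j) (by rw [hf]; exact hv)
    simp only [List.foldl_cons]
    rw [pvStep_keep _ _ _ (hmem h (by simp))]
    rw [pvFold_some j t h (fun v hv => hmem v (by simp [hv]))]
    have : pvMin2 h h = h := by simp [pvMin2]
    simp [this]

lemma pvKeep_even (j : Int) (hj : PySem.Int.mod j 2 = 0) :
    (fun v => PySem.Int.mod v 2 == 0) = pvKeep j := by
  funext v; unfold pvKeep; rw [hj]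

lemma pvKeep_odd (j : Int) (hj : PySem.Int.mod j 2 = 1) :
    (fun v => PySem.Int.mod v 2 != 0) = pvKeep j := by
  funext v
  unfold pvKeep
  rw [hj]
  rcases PySem.Int.mod_two_eq v with h | h <;> rw [h] <;> rfl

lemma pvBranch_eq (keep : Int → Bool) (ml : List Int) :
    pvMinLoop (pvPopLoop keep ml.length ml 0 0) =
      (match ml.filter keep with
       | [] => (-1 : Int)
       | h :: t => (h :: t).foldl pvMin2 h) := by
  have h0 : pvPopLoop keep ml.length ml ((0 : Nat) : Int) ((0 : Nat) : Int) =
      ml.take 0 ++ (ml.drop 0).filter keep := pvPopLoop_eq keep ml.length ml 0 (by omega)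
  simp only [Nat.cast_zero, List.take_zero, List.drop_zero, List.nil_append] at h0
  rw [h0]
  cases hf : ml.filter keep with
  | nil => rfl
  | cons h t =>
    rw [pvMinLoop_eq _ (by simp)]
    rfl

lemma smallest_1_eq (M : List (List Int)) (j : Int) (hM : M ≠ [[]]) :
    smallest_1 M j =
      ((pvColVals M j).foldl (fun b v => pvStep b v j) none).elim (-1 : Int) id := by
  unfold smallest_1
  rw [if_neg (by simpa using hM)]
  rw [pvOmin_eq]
  rcases PySem.Int.mod_two_eq j with hj | hj
  · rw [if_neg (by rw [hj]; decide), if_pos (by rw [hj]; decide)]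
    show pvMinLoop (pvPopLoop (fun v => PySem.Int.mod v 2 == 0)
        (pvGather M j).length (pvGather M j) 0 0) = _
    rw [pvBranch_eq, pvGather_eq, pvKeep_even j hj]
  · rw [if_pos (by rw [hj]; decide)]
    show pvMinLoop (pvPopLoop (fun v => PySem.Int.mod v 2 != 0)
        (pvGather M j).length (pvGather M j) 0 0) = _
    rw [pvBranch_eq, pvGather_eq, pvKeep_odd j hj]

lemma pvRows_fold (cols : Nat) (rows : List (List Int)) :
    ∀ (g : Int → Option Int),
    rows.foldl (fun best row => (PySem.List.pyRange 0 cols 1).map (fun j =>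
        pvStep (PySem.List.pyGetD best j none) (PySem.List.pyGetD row j 0) j))
      ((PySem.List.pyRange 0 cols 1).map g)
    = (PySem.List.pyRange 0 cols 1).map (fun j =>
        rows.foldl (fun b row => pvStep b (PySem.List.pyGetD row j 0) j) (g j)) := by
  induction rows with
  | nil => intro g; rfl
  | cons r rows ih =>
    intro g
    simp only [List.foldl_cons]
    have hinner : (PySem.List.pyRange 0 cols 1).map (fun j =>
        pvStep (PySem.List.pyGetD ((PySem.List.pyRange 0 cols 1).map g) j none)
          (PySem.List.pyGetD r j 0) j)
      = (PySem.List.pyRange 0 cols 1).map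
          (fun j => pvStep (g j) (PySem.List.pyGetD r j 0) j) := by
      apply List.map_congr_left
      intro j hj
      rw [PySem.List.mem_pyRange_one] at hj
      rw [PySem.List.pyGetD_map_pyRange_of_nonneg g cols j none hj.1 hj.2]
    rw [hinner, ih (fun j => pvStep (g j) (PySem.List.pyGetD r j 0) j)]

lemma pvAlt_eq (M : List (List Int)) :
    smallest_all_alt M =
      (PySem.List.pyRange 0 ((PySem.List.pyGetD M 0 []).length) 1).map
        (fun j => ((pvColVals M j).foldl (fun b v => pvStep b v j) none).elim (-1 : Int) id) := by
  have hdef : smallest_all_alt M =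
      (M.foldl (fun best row =>
          (PySem.List.pyRange 0 ((PySem.List.pyGetD M 0 []).length) 1).map (fun j =>
            pvStep (PySem.List.pyGetD best j none) (PySem.List.pyGetD row j 0) j))
        (List.replicate (PySem.List.pyGetD M 0 []).length none)).map
        (fun b => match b with | none => -1 | some m => m) := rfl
  rw [hdef]
  have hrep : List.replicate (PySem.List.pyGetD M 0 []).length (none : Option Int)
      = (PySem.List.pyRange 0 ((PySem.List.pyGetD M 0 []).length) 1).map
          (fun _ => (none : Option Int)) := by
    rw [List.map_const', PySem.List.length_pyRange_one]
    simp
  rw [hrep, pvRows_fold]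
  rw [List.map_map]
  apply List.map_congr_left
  intro j hj
  simp only [Function.comp_apply]
  unfold pvColVals
  rw [List.foldl_map]
  cases (M.foldl (fun b row => pvStep b (PySem.List.pyGetD row j 0) j) none) <;> rfl

-- ===== VERDICT (by name: the statement is the Claim_ definition above) =====
theorem smallest_all_spec : Claim_equal_smallest_all := by
  intro M _ _
  unfold Spec_smallest_all
  rw [pvAlt_eq]
  unfold smallest_all
  rw [PySem.List.foldl_append_singleton_eq_map, List.nil_append]
  apply List.map_congr_left
  intro j hj
  rw [PySem.List.mem_pyRange_one] at hj
  apply smallest_1_eq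
  intro hM
  rw [hM] at hj
  simp [PySem.List.pyGetD_zero_cons] at hj
  omega
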